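-- pv_equiv track=rewrite | github.com/kaluginpeter/Algorithms_and_structures_tasks | Python_Solutions/CodeWars/7kyu/Spin_Around_Touch_the_Ground.py | spin_around
-- ===== SOURCE A (Python) =====
-- def spin_around(lst):
--     count = 0
--     for i in lst:
--         if i == 'left':
--             count -= 1
--         else:
--             count += 1
--     return abs(count) // 4
-- ===== SOURCE B (Python) =====
-- def spin_around(lst):
--     # Stack-based cancellation: opposite adjacent turns annihilate; the surviving
--     # stack is homogeneous, so its size is the net turn magnitude.
--     stack = []
--     for tok in lst:
--         step = -1 if tok == 'left' else 1
--         if stack and stack[-1] == -step: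
--             stack.pop()
--         else:
--             stack.append(step)
--     return len(stack) // 4
-- ===== Notes on version B (the rewrite author's own statement) =====
-- stated objective: alternative
-- what changed: Replaces A's signed counter with a cancellation stack: each turn pops an opposite turn off the stack or is pushed, and the answer is len(stack)//4 since the surviving stack is homogeneous and its size equals |net|.
import Mathlib
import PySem

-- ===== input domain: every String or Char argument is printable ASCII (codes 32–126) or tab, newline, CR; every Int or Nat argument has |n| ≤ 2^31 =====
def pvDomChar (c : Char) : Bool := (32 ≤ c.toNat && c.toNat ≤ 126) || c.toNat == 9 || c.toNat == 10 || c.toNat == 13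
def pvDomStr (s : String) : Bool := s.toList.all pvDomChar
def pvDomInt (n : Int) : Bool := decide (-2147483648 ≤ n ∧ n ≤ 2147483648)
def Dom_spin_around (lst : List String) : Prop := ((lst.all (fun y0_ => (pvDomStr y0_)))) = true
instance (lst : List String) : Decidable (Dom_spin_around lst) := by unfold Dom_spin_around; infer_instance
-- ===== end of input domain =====

-- B replaces A's signed counter with a cancellation stack (opposite turns annihilate; answer = stack size // 4); objective: alternative.

-- ===== PORT A =====
def spin_around (lst : List String) : Int :=
  let count := lst.foldl (fun count i => if i == "left" then count - 1 else count + 1) (0 : Int)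
  PySem.Int.floordiv (Int.natAbs count) 4

-- ===== PORT B =====
-- Source B's stack grows at the end; here the head of the list is the top of the stack (same pushes/pops, mirrored).
def spin_around_alt (lst : List String) : Int :=
  let stack := lst.foldl (fun stack tok =>
    let step : Int := if tok == "left" then -1 else 1
    match stack with
    | top :: rest => if top == -step then rest else step :: top :: rest
    | [] => [step]) ([] : List Int)
  PySem.Int.floordiv (stack.length : Int) 4

-- ===== PRECONDITION & SPEC =====
def Spec_spin_around (lst : List String) (out : Int) : Prop := out = spin_around_alt lst
instance (lst : List String) (out : Int) : Decidable (Spec_spin_around lst out) := by unfold Spec_spin_around; infer_instance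

-- ===== CLAIM (what is proved, stated in full; the proofs are below) =====
def Claim_equal_spin_around : Prop := ∀ (lst : List String), Dom_spin_around lst → Spec_spin_around lst (spin_around lst)

-- ===== LEMMAS AND PROOFS =====

-- canonical homogeneous stack holding net value c
def pvRepr (c : Int) : List Int :=
  if 0 ≤ c then List.replicate c.toNat 1 else List.replicate (-c).toNat (-1)

theorem pvRepr_length (c : Int) : (pvRepr c).length = c.natAbs := by
  unfold pvRepr; split_ifs with h <;> simp <;> omega

theorem step_core (c s : Int) (hs : s = -1 ∨ s = 1) :
    (match pvRepr c with
     | top :: rest => if top == -s then rest else s :: top :: rest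
     | [] => [s]) = pvRepr (c + s) := by
  unfold pvRepr
  rcases hs with rfl | rfl <;> rcases lt_trichotomy c 0 with h | rfl | h
  · -- s = -1, c < 0 : push -1
    have h1 : ¬ (0 ≤ c) := by omega
    have h2 : ¬ (0 ≤ c + (-1)) := by omega
    obtain ⟨n, hn⟩ : ∃ n, (-c).toNat = n + 1 := ⟨(-c).toNat - 1, by omega⟩
    have hn2 : (-(c + (-1))).toNat = n + 2 := by omega
    simp only [h1, h2, if_false, hn, hn2, List.replicate_succ]
    norm_num
  · -- s = -1, c = 0 : push onto empty
    norm_num [List.replicate_succ]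
  · -- s = -1, c > 0 : pop a 1
    have h1 : (0 : Int) ≤ c := by omega
    have h2 : (0 : Int) ≤ c + (-1) := by omega
    obtain ⟨n, hn⟩ : ∃ n, c.toNat = n + 1 := ⟨c.toNat - 1, by omega⟩
    have hn2 : (c + (-1)).toNat = n := by omega
    simp only [h1, h2, if_true, hn, hn2, List.replicate_succ]
    norm_num
  · -- s = 1, c < 0 : pop a -1
    have h1 : ¬ (0 ≤ c) := by omega
    obtain ⟨n, hn⟩ : ∃ n, (-c).toNat = n + 1 := ⟨(-c).toNat - 1, by omega⟩
    simp only [h1, if_false, hn, List.replicate_succ]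
    by_cases h2 : (0 : Int) ≤ c + 1
    · have hc : c = -1 := by omega
      subst hc
      have hn0 : n = 0 := by omega
      subst hn0; norm_num
    · have hn2 : (-(c + 1)).toNat = n := by omega
      simp only [h2, if_false, hn2]
      norm_num
  · -- s = 1, c = 0 : push onto empty
    norm_num [List.replicate_succ]
  · -- s = 1, c > 0 : push 1
    have h1 : (0 : Int) ≤ c := by omega
    have h2 : (0 : Int) ≤ c + 1 := by omega
    obtain ⟨n, hn⟩ : ∃ n, c.toNat = n + 1 := ⟨c.toNat - 1, by omega⟩
    have hn2 : (c + 1).toNat = n + 2 := by omega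
    simp only [h1, h2, if_true, hn, hn2, List.replicate_succ]
    norm_num

theorem step_repr (c : Int) (tok : String) :
    ((fun stack tok =>
      let step : Int := if tok == "left" then -1 else 1
      match stack with
      | top :: rest => if top == -step then rest else step :: top :: rest
      | [] => [step]) (pvRepr c) tok)
    = pvRepr ((fun count i => if i == "left" then count - 1 else count + 1) c tok) := by
  by_cases htok : tok = "left"
  · simpa [htok, sub_eq_add_neg] using step_core c (-1) (Or.inl rfl)
  · simpa [htok] using step_core c 1 (Or.inr rfl)

theorem foldl_repr (lst : List String) (c : Int) :
    lst.foldl (fun stack tok =>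
      let step : Int := if tok == "left" then -1 else 1
      match stack with
      | top :: rest => if top == -step then rest else step :: top :: rest
      | [] => [step]) (pvRepr c)
    = pvRepr (lst.foldl (fun count i => if i == "left" then count - 1 else count + 1) c) := by
  induction lst generalizing c with
  | nil => rfl
  | cons x xs ih => simp only [List.foldl_cons, step_repr, ih]

theorem foldl_repr0 (lst : List String) :
    lst.foldl (fun stack tok =>
      let step : Int := if tok == "left" then -1 else 1
      match stack with
      | top :: rest => if top == -step then rest else step :: top :: rest
      | [] => [step]) ([] : List Int)
    = pvRepr (lst.foldl (fun count i => if i == "left" then count - 1 else count + 1) 0) :=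
  foldl_repr lst 0

-- ===== VERDICT (by name: the statement is the Claim_ definition above) =====
theorem spin_around_spec : Claim_equal_spin_around := by
  intro lst _
  unfold Spec_spin_around spin_around spin_around_alt
  simp only [foldl_repr0, pvRepr_length]
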